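-- pv_equiv track=rewrite | github.com/2zN-l/lab3 | file/zadanie2.1.py | calc
-- ===== SOURCE A (Python) =====
-- def calc(u, v, k):
--     if k == 1:
--         return u, v
--     else:
--         a_k_1, b_k_1 = calc(u, v, k - 1)
--         a_k = 2 * b_k_1 + a_k_1
--         b_k = 2 * b_k_1 ** 2 + b_k_1
--         return a_k, b_k
-- ===== SOURCE B (Python) =====
-- def calc(u, v, k):
--     a, b = u, v
--     for _ in range(2, k + 1):
--         a, b = 2 * b + a, 2 * b ** 2 + b
--     return a, b
-- ===== Notes on version B (the rewrite author's own statement) =====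
-- stated objective: simpler
-- what changed: Replaces A's recursion (which recurses k-1 times before the arithmetic unwinds, and overflows the Python stack for large or non-positive k) with a single iterative loop carrying the pair (a,b) as an accumulator.
import Mathlib
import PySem

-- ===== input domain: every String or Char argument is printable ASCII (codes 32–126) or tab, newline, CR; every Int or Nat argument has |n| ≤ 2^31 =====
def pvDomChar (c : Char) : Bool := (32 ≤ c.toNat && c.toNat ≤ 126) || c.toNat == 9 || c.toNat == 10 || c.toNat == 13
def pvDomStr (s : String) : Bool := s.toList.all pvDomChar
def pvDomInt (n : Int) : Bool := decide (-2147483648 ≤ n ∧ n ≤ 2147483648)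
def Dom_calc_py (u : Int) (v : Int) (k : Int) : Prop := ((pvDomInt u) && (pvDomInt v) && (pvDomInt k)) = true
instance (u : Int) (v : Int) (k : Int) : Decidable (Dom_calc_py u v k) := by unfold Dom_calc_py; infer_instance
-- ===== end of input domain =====

-- ===== PORT A =====
-- A recurses on k-1 until k == 1; for k < 1 the Python never terminates (RecursionError),
-- excluded by Pre_. The recursion is modeled structurally on k.toNat (exact for k >= 1).
def calcAuxA (u : Int) (v : Int) : Nat → Int × Int
  | 0 => (u, v)            -- unreached for inputs satisfying Pre_ (k ≥ 1)
  | 1 => (u, v)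
  | n + 2 =>
    let p := calcAuxA u v (n + 1)
    (2 * p.2 + p.1, 2 * p.2 ^ 2 + p.2)

def calc_py (u : Int) (v : Int) (k : Int) : Int × Int := calcAuxA u v k.toNat

-- ===== PORT B =====
-- B: for _ in range(2, k+1): a, b = 2*b + a, 2*b**2 + b  — folded over the k-1 loop iterations.
def calc_py_alt (u : Int) (v : Int) (k : Int) : Int × Int :=
  (List.range (k - 1).toNat).foldl
    (fun (p : Int × Int) _ => (2 * p.2 + p.1, 2 * p.2 ^ 2 + p.2)) (u, v)

-- ===== PRECONDITION & SPEC =====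
-- Pre_ excludes k < 1, where the Python A recurses without bound (RecursionError).
def Pre_calc_py (u : Int) (v : Int) (k : Int) : Prop := 1 ≤ k
instance (u : Int) (v : Int) (k : Int) : Decidable (Pre_calc_py u v k) := by unfold Pre_calc_py; infer_instance
def pvWitness_calc_py : Int × Int × Int := (2, 3, 5)

def Spec_calc_py (u : Int) (v : Int) (k : Int) (out : Int × Int) : Prop := out = calc_py_alt u v k
instance (u : Int) (v : Int) (k : Int) (out : Int × Int) : Decidable (Spec_calc_py u v k out) := by unfold Spec_calc_py; infer_instance

-- ===== CLAIM (what is proved, stated in full; the proofs are below) =====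
def Claim_equal_calc_py : Prop := ∀ (u : Int) (v : Int) (k : Int), Dom_calc_py u v k → Pre_calc_py u v k → Spec_calc_py u v k (calc_py u v k)

-- ===== LEMMAS AND PROOFS =====
-- A's recursion at fuel n+1 equals B's fold over n loop iterations.
theorem calcAuxA_eq_foldl (u v : Int) (n : Nat) :
    calcAuxA u v (n + 1) =
      (List.range n).foldl (fun (p : Int × Int) _ => (2 * p.2 + p.1, 2 * p.2 ^ 2 + p.2)) (u, v) := by
  induction n with
  | zero => rfl
  | succ m ih =>
    rw [List.range_succ, List.foldl_append, ← ih]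
    rfl

-- ===== VERDICT (by name: the statement is the Claim_ definition above) =====
theorem calc_py_spec : Claim_equal_calc_py := by
  intro u v k _ hpre
  unfold Pre_calc_py at hpre
  unfold Spec_calc_py calc_py calc_py_alt
  have hk : k.toNat = (k - 1).toNat + 1 := by omega
  rw [hk, calcAuxA_eq_foldl]
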